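-- pv_equiv track=rewrite | github.com/Boot10it/ADBA_Race_Draw | Archive/Finals draw look.py | get_lane_order
-- ===== SOURCE A (Python) =====
-- def get_lane_order(num_lanes):
--     """
--     Returns a list of lane numbers (1-based) in the desired order:
--     - Start from the middle lane, then alternate right and left.
--     """
--     order = []
--     if num_lanes == 0:
--         return order
--     mid = (num_lanes + 1) // 2
--     order.append(mid)
--     offset = 1
--     while len(order) < num_lanes:
--         if mid + offset <= num_lanes:
--             order.append(mid + offset)
--         if len(order) < num_lanes and mid - offset > 0:
--             order.append(mid - offset)
--         offset += 1
--     return order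
-- ===== SOURCE B (Python) =====
-- def get_lane_order(num_lanes):
--     """
--     Returns a list of lane numbers (1-based) in the desired order:
--     - Start from the middle lane, then alternate right and left.
--     """
--     if num_lanes == 0:
--         return []
--     mid = (num_lanes + 1) // 2
--     right = list(range(mid + 1, num_lanes + 1))
--     left = list(range(mid - 1, 0, -1))
--     out = [mid]
--     for r, l in zip(right, left):
--         out.append(r)
--         out.append(l)
--     k = min(len(right), len(left))
--     out.extend(right[k:])
--     out.extend(left[k:])
--     return out
-- ===== Notes on version B (the rewrite author's own statement) =====
-- stated objective: simpler
-- what changed: Replaces the guarded while loop growing one list around the middle with a build-two-ranges-then-interleave shape: a right-side range and a descending left-side range are zip-merged right-first and the leftover tail appended.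
import Mathlib
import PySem

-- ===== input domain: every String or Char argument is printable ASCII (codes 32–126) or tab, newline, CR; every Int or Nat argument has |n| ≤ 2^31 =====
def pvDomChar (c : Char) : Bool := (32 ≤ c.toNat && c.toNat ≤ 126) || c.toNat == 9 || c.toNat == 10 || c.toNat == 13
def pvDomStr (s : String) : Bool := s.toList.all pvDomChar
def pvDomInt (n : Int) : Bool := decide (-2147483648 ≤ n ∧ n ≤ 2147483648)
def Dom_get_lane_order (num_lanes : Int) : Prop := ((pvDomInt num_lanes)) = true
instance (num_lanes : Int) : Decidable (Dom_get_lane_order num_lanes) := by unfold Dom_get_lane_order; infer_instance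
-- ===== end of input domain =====

-- B replaces A's guarded while loop with build-two-ranges-then-interleave (objective: simpler).

-- ===== PORT A =====
-- The while loop, as fuel recursion. Fuel num_lanes.toNat exceeds the number of
-- iterations the Python loop performs (at most max(n-mid, mid-1) ≤ n-1 for n ≥ 1,
-- and 0 otherwise), so the fuel guard never fires: the port is exact.
def loopA (n mid : Int) : Nat → List Int → Int → List Int
  | 0, order, _ => order
  | fuel+1, order, offset =>
    if (order.length : Int) < n then
      let order1 := if mid + offset ≤ n then order ++ [mid + offset] else order
      let order2 := if (order1.length : Int) < n ∧ mid - offset > 0 then order1 ++ [mid - offset] else order1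
      loopA n mid fuel order2 (offset + 1)
    else order

def get_lane_order (num_lanes : Int) : List Int :=
  if num_lanes == 0 then [] else
    let mid := PySem.Int.floordiv (num_lanes + 1) 2
    loopA num_lanes mid num_lanes.toNat [mid] 1

-- ===== PORT B =====
def get_lane_order_alt (num_lanes : Int) : List Int :=
  if num_lanes == 0 then [] else
    let mid := PySem.Int.floordiv (num_lanes + 1) 2
    let right := PySem.List.pyRange (mid + 1) (num_lanes + 1) 1
    let left := PySem.List.pyRange (mid - 1) 0 (-1)
    let out := [mid] ++ (right.zip left).flatMap (fun p => [p.1, p.2])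
    let k := min right.length left.length
    -- right[k:] / left[k:] with 0 ≤ k = min of the lengths: exactly List.drop k
    out ++ right.drop k ++ left.drop k

-- ===== PRECONDITION & SPEC =====
def Spec_get_lane_order (num_lanes : Int) (out : List Int) : Prop := out = get_lane_order_alt num_lanes
instance (num_lanes : Int) (out : List Int) : Decidable (Spec_get_lane_order num_lanes out) := by unfold Spec_get_lane_order; infer_instance

-- ===== CLAIM (what is proved, stated in full; the proofs are below) =====
def Claim_equal_get_lane_order : Prop := ∀ (num_lanes : Int), Dom_get_lane_order num_lanes → Spec_get_lane_order num_lanes (get_lane_order num_lanes)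

-- ===== LEMMAS AND PROOFS =====

-- Common description of the part after the initial [mid]: starting at the current
-- offset, l lanes remain on the left and l + e (e ∈ {0,1}) on the right.
def tailSpec (mid : Int) : Int → Nat → Nat → List Int
  | _, 0, 0 => []
  | offset, 0, _+1 => [mid + offset]
  | offset, l+1, e => (mid + offset) :: (mid - offset) :: tailSpec mid (offset+1) l e

theorem loopA_exit (n mid : Int) (fuel : Nat) (order : List Int) (offset : Int)
    (h : n ≤ (order.length : Int)) : loopA n mid fuel order offset = order := by
  cases fuel with
  | zero => rfl
  | succ f => simp [loopA, not_lt.mpr h]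

theorem loopA_eq_tailSpec (l e : Nat) (he : e ≤ 1) :
    ∀ (fuel : Nat) (n mid offset : Int) (acc : List Int),
    mid - offset = (l : Int) →
    n - mid - offset + 1 = (l : Int) + (e : Int) →
    (acc.length : Int) = n - (2 * l + (e : Int)) →
    l + e ≤ fuel →
    loopA n mid fuel acc offset = acc ++ tailSpec mid offset l e := by
  induction l with
  | zero =>
    intro fuel n mid offset acc h1 h2 h3 h4
    push_cast at h1 h2 h3
    match e, he with
    | 0, _ =>
      simp only [tailSpec, List.append_nil]
      exact loopA_exit n mid fuel acc offset (by omega)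
    | 1, _ =>
      norm_num at h2 h3 h4
      obtain ⟨f, rfl⟩ : ∃ f, fuel = f + 1 := ⟨fuel - 1, by omega⟩
      have hc1 : ((acc.length : Int)) < n := by omega
      have hc2 : mid + offset ≤ n := by omega
      have hc3 : ¬(((acc ++ [mid + offset]).length : Int) < n ∧ mid - offset > 0) := by
        simp only [List.length_append, List.length_cons, List.length_nil]
        push_cast; omega
      simp only [loopA, if_pos hc1, if_pos hc2, if_neg hc3]
      rw [loopA_exit n mid f _ (offset + 1)
        (by simp only [List.length_append, List.length_cons, List.length_nil]; push_cast; omega)]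
      simp [tailSpec]
  | succ l ih =>
    intro fuel n mid offset acc h1 h2 h3 h4
    push_cast at h1 h2 h3
    obtain ⟨f, rfl⟩ : ∃ f, fuel = f + 1 := ⟨fuel - 1, by omega⟩
    have hc1 : ((acc.length : Int)) < n := by omega
    have hc2 : mid + offset ≤ n := by omega
    have hc3 : (((acc ++ [mid + offset]).length : Int) < n ∧ mid - offset > 0) := by
      constructor
      · simp only [List.length_append, List.length_cons, List.length_nil]
        push_cast; omega
      · omega
    simp only [loopA, if_pos hc1, if_pos hc2, if_pos hc3]
    rw [ih f n mid (offset + 1) (acc ++ [mid + offset] ++ [mid - offset])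
      (by omega)
      (by omega)
      (by simp only [List.length_append, List.length_cons, List.length_nil]; push_cast; omega)
      (by omega)]
    simp [tailSpec]

theorem B_tail (l e : Nat) (he : e ≤ 1) :
    ∀ (mid offset : Int), mid - offset = (l : Int) →
    ∀ (R L : List Int),
    R = PySem.List.pyRange (mid + offset) (mid + offset + (l : Int) + (e : Int)) 1 →
    L = PySem.List.pyRange (mid - offset) 0 (-1) →
    (R.zip L).flatMap (fun p => [p.1, p.2]) ++ R.drop (min R.length L.length) ++ L.drop (min R.length L.length)
      = tailSpec mid offset l e := by
  induction l with
  | zero =>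
    intro mid offset h1 R L hR hL
    push_cast at h1
    have hLnil : L = [] := by
      rw [hL]; exact PySem.List.pyRange_neg_one_eq_nil (by omega)
    match e, he with
    | 0, _ =>
      have hRnil : R = [] := by
        rw [hR]; exact PySem.List.pyRange_one_eq_nil (by push_cast; omega)
      subst hRnil; subst hLnil; simp [tailSpec]
    | 1, _ =>
      have hRone : R = [mid + offset] := by
        rw [hR, show mid + offset + ((0:Nat) : Int) + ((1:Nat) : Int) = (mid + offset) + 1 by push_cast; ring]
        exact PySem.List.pyRange_one_singleton _
      subst hRone; subst hLnil; simp [tailSpec]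
  | succ l ih =>
    intro mid offset h1 R L hR hL
    push_cast at h1
    have hLcons : L = (mid - offset) :: PySem.List.pyRange (mid - (offset + 1)) 0 (-1) := by
      rw [hL, PySem.List.pyRange_neg_one_cons (by omega)]
      norm_num
      congr 1
      ring
    have hRcons : R = (mid + offset) ::
        PySem.List.pyRange (mid + (offset + 1)) (mid + (offset + 1) + (l : Int) + (e : Int)) 1 := by
      rw [hR, show mid + offset + ((l+1 : Nat) : Int) + (e : Int) = mid + (offset + 1) + (l : Int) + (e : Int) by push_cast; ring,
        PySem.List.pyRange_one_cons (by omega),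
        show mid + offset + 1 = mid + (offset + 1) by ring]
    rw [hRcons, hLcons]
    simp only [List.zip_cons_cons, List.flatMap_cons, List.length_cons, Nat.succ_min_succ,
      List.drop_succ_cons, List.cons_append, List.nil_append]
    rw [ih mid (offset + 1) (by omega) _ _ rfl rfl]
    simp [tailSpec]

theorem equal_of_pos (n : Int) (hn : 1 ≤ n) : get_lane_order n = get_lane_order_alt n := by
  have h0 : (n == 0) = false := by simp; omega
  have hm : PySem.Int.floordiv (n + 1) 2 = (n + 1) / 2 :=
    PySem.Int.floordiv_eq_ediv_of_pos (by norm_num)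
  simp only [get_lane_order, get_lane_order_alt, h0, Bool.false_eq_true, if_false, hm]
  set mid := (n + 1) / 2 with hmid
  set l0 : Nat := (mid - 1).toNat with hl0
  have hex : n = 2 * mid ∨ n = 2 * mid - 1 := by omega
  rcases hex with hev | hodd
  · -- n even: one extra lane on the right
    have hBt := B_tail l0 1 (by omega) mid 1 (by omega)
      (PySem.List.pyRange (mid + 1) (n + 1) 1) (PySem.List.pyRange (mid - 1) 0 (-1))
      (by rw [show mid + 1 + ((l0 : Nat) : Int) + ((1 : Nat) : Int) = n + 1 by push_cast; omega]) rfl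
    rw [loopA_eq_tailSpec l0 1 (by omega) n.toNat n mid 1 [mid]
      (by omega) (by push_cast; omega) (by simp; omega) (by omega)]
    rw [← hBt]
    simp
  · -- n odd: sides balanced
    have hBt := B_tail l0 0 (by omega) mid 1 (by omega)
      (PySem.List.pyRange (mid + 1) (n + 1) 1) (PySem.List.pyRange (mid - 1) 0 (-1))
      (by rw [show mid + 1 + ((l0 : Nat) : Int) + ((0 : Nat) : Int) = n + 1 by push_cast; omega]) rfl
    rw [loopA_eq_tailSpec l0 0 (by omega) n.toNat n mid 1 [mid]
      (by omega) (by push_cast; omega) (by simp; omega) (by omega)]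
    rw [← hBt]
    simp

theorem equal_of_neg (n : Int) (hn : n ≤ -1) : get_lane_order n = get_lane_order_alt n := by
  have h0 : (n == 0) = false := by simp; omega
  have hm : PySem.Int.floordiv (n + 1) 2 = (n + 1) / 2 :=
    PySem.Int.floordiv_eq_ediv_of_pos (by norm_num)
  simp only [get_lane_order, get_lane_order_alt, h0, Bool.false_eq_true, if_false, hm]
  set mid := (n + 1) / 2 with hmid
  have ht : n.toNat = 0 := by omega
  have hRnil : PySem.List.pyRange (mid + 1) (n + 1) 1 = [] :=
    PySem.List.pyRange_one_eq_nil (by omega)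
  have hLnil : PySem.List.pyRange (mid - 1) 0 (-1) = [] :=
    PySem.List.pyRange_neg_one_eq_nil (by omega)
  rw [ht, hRnil, hLnil]
  simp [loopA]

-- ===== VERDICT (by name: the statement is the Claim_ definition above) =====
theorem get_lane_order_spec : Claim_equal_get_lane_order := by
  intro n _
  unfold Spec_get_lane_order
  rcases lt_trichotomy n 0 with h | h | h
  · exact equal_of_neg n (by omega)
  · subst h; rfl
  · exact equal_of_pos n (by omega)
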